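-- pv_equiv track=rewrite | github.com/tossy0130/Image_VideoAnalysis_25_001 | Test_25_07/Test02.py | extract_clusters
-- ===== SOURCE A (Python) =====
-- def extract_clusters(diff_map, min_cluster_size=30):
--     h, w = len(diff_map), len(diff_map[0])
--     visited = [[False]*w for _ in range(h)]
--     clusters = []
--
--     ### 幅優先探索でクラスタ化 ###
--     def dfs(y, x, pixels):
--         stack = [(y, x)]
--         visited[y][x] = True
--         while stack:
--             cy, cx = stack.pop()
--             pixels.append((cy, cx))
--             for dy in [-1,0,1]:
--                 for dx in [-1,0,1]:
--                     ny, nx = cy+dy, cx+dx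
--                     if 0<=ny<h and 0<=nx<w and diff_map[ny][nx] and not visited[ny][nx]:
--                         visited[ny][nx] = True
--                         stack.append((ny, nx))
--
--     for y in range(h):
--         for x in range(w):
--             # まだ訪問していない動き部分をクラスタ化
--             if diff_map[y][x] and not visited[y][x]:
--                 pixels = []
--                 dfs(y, x, pixels)
--                 if len(pixels) >= min_cluster_size:
--                     # クラスタの重心座標を計算
--                     cy = sum(p[0] for p in pixels) // len(pixels)
--                     cx = sum(p[1] for p in pixels) // len(pixels)
--                     clusters.append((cy, cx))
--     return clusters
-- ===== SOURCE B (Python) =====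
-- def extract_clusters(diff_map, min_cluster_size=30):
--     h, w = len(diff_map), len(diff_map[0])
--     seen = set()
--     clusters = []
--     for y, row in enumerate(diff_map):
--         for x, v in enumerate(row[:w]):
--             if v and (y, x) not in seen:
--                 seen.add((y, x))
--                 n, sy, sx = 1, y, x
--                 frontier = [(y, x)]
--                 while frontier:
--                     cand = [(cy + dy, cx + dx)
--                             for cy, cx in frontier
--                             for dy in (-1, 0, 1)
--                             for dx in (-1, 0, 1)]
--                     frontier = []
--                     for ny, nx in cand:
--                         if 0 <= ny < h and 0 <= nx < w and diff_map[ny][nx] and (ny, nx) not in seen: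
--                             seen.add((ny, nx))
--                             frontier.append((ny, nx))
--                             n += 1
--                             sy += ny
--                             sx += nx
--                 if n >= min_cluster_size:
--                     clusters.append((sy // n, sx // n))
--     return clusters
-- ===== Notes on version B (the rewrite author's own statement) =====
-- stated objective: alternative
-- what changed: A's depth-first flood fill (explicit stack popped from the end, per-component pixel list, h*w visited boolean matrix, nested index ranges) is replaced by a layered breadth-first fill: each round builds a candidate list by a comprehension over the whole frontier and filters it into the next frontier, a global visited hash set replaces the matrix, the centroid is computed from running count/sum accumulators with no pixel list kept, and the grid is walked with enumerate over the rows; centroids agree because count and coordinate sums are permutation-invariant over the component.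
import Mathlib
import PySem

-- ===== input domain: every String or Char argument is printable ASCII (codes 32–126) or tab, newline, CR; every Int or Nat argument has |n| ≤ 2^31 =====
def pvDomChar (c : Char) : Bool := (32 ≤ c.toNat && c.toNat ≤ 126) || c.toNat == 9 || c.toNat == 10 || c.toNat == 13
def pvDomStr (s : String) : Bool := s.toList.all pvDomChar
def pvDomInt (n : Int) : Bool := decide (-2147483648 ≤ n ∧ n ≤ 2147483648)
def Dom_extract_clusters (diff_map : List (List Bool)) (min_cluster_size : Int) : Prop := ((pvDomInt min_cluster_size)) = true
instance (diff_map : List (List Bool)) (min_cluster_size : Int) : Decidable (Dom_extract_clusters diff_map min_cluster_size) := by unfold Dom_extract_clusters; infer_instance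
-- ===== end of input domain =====

-- B replaces A's depth-first flood fill (explicit stack popped from the end, pixel list,
-- h*w visited matrix, nested index ranges) by a layered breadth-first fill: each round a
-- candidate comprehension over the whole frontier is filtered into the next frontier, a
-- visited set replaces the matrix, centroids come from running count/sum accumulators and
-- the grid is walked with enumerate; same return value (alternative, no speed claim).

-- ===== PORT A =====
-- one neighbour test of the dfs scan: `if 0<=ny<h and 0<=nx<w and diff_map[ny][nx] and not visited[ny][nx]`
def pvAStep (diff_map : List (List Bool)) (h w : Int)
    (st : List (List Bool) × List (Int × Int)) (ny nx : Int) :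
    List (List Bool) × List (Int × Int) :=
  if 0 ≤ ny ∧ ny < h ∧ 0 ≤ nx ∧ nx < w
      ∧ PySem.List.pyGetD (PySem.List.pyGetD diff_map ny []) nx false = true
      ∧ ¬ PySem.List.pyGetD (PySem.List.pyGetD st.1 ny []) nx false = true then
    (PySem.List.pySetD st.1 ny (PySem.List.pySetD (PySem.List.pyGetD st.1 ny []) nx true),
     st.2 ++ [(ny, nx)])
  else st

-- `for dy in [-1,0,1]: for dx in [-1,0,1]: …`
def pvAExpand (diff_map : List (List Bool)) (h w cy cx : Int)
    (st : List (List Bool) × List (Int × Int)) :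
    List (List Bool) × List (Int × Int) :=
  ([-1, 0, 1] : List Int).foldl (fun st dy =>
    ([-1, 0, 1] : List Int).foldl (fun st dx =>
      pvAStep diff_map h w st (cy + dy) (cx + dx)) st) st

-- `while stack: cy,cx = stack.pop(); pixels.append((cy,cx)); <neighbour scan>`
-- (fuel makes the while loop structurally recursive; the port always gets enough, see pvADfs_run)
def pvADfs (diff_map : List (List Bool)) (h w : Int) :
    Nat → List (List Bool) → List (Int × Int) → List (Int × Int) →
    List (List Bool) × List (Int × Int)
  | 0, visited, _, pixels => (visited, pixels)
  | fuel + 1, visited, stack, pixels =>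
    match stack.getLast? with
    | none => (visited, pixels)
    | some c =>
      let st := pvAExpand diff_map h w c.1 c.2 (visited, stack.dropLast)
      pvADfs diff_map h w fuel st.1 st.2 (pixels ++ [c])

-- body of the double loop `for y in range(h): for x in range(w): …`
def pvACell (diff_map : List (List Bool)) (h w min_cluster_size : Int) (fuel : Nat)
    (st : List (List Bool) × List (Int × Int)) (y x : Int) :
    List (List Bool) × List (Int × Int) :=
  if PySem.List.pyGetD (PySem.List.pyGetD diff_map y []) x false = true
      ∧ ¬ PySem.List.pyGetD (PySem.List.pyGetD st.1 y []) x false = true then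
    -- dfs(y, x, pixels): marks visited[y][x] then runs the while loop
    let res := pvADfs diff_map h w fuel
        (PySem.List.pySetD st.1 y (PySem.List.pySetD (PySem.List.pyGetD st.1 y []) x true))
        [(y, x)] []
    if min_cluster_size ≤ (res.2.length : Int) then
      (res.1, st.2 ++ [(PySem.Int.floordiv (res.2.map Prod.fst).sum (res.2.length : Int),
                        PySem.Int.floordiv (res.2.map Prod.snd).sum (res.2.length : Int))])
    else (res.1, st.2)
  else st

def extract_clusters (diff_map : List (List Bool)) (min_cluster_size : Int) : List (Int × Int) :=
  let h : Int := (diff_map.length : Int)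
  -- diff_map[0]: Python raises IndexError on an empty diff_map — excluded by Pre_
  let w : Int := ((PySem.List.pyGetD diff_map 0 []).length : Int)
  let visited0 := List.replicate h.toNat (List.replicate w.toNat false)
  let fuel := (h * w).toNat + 1
  ((PySem.List.pyRange 0 h 1).foldl (fun st y =>
    (PySem.List.pyRange 0 w 1).foldl (fun st x =>
      pvACell diff_map h w min_cluster_size fuel st y x) st)
    (visited0, ([] : List (Int × Int)))).2

-- ===== PORT B =====
-- `cand = [(cy+dy, cx+dx) for cy,cx in frontier for dy in (-1,0,1) for dx in (-1,0,1)]`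
def pvCand (frontier : List (Int × Int)) : List (Int × Int) :=
  frontier.flatMap (fun c =>
    ([-1, 0, 1] : List Int).flatMap (fun dy =>
      ([-1, 0, 1] : List Int).map (fun dx => (c.1 + dy, c.2 + dx))))

-- `for ny, nx in cand: if 0<=ny<h and 0<=nx<w and diff_map[ny][nx] and (ny,nx) not in seen: …`
-- state = (seen, next frontier, n, sy, sx)
def pvScan (dm : List (List Bool)) (h w : Int)
    (st : PySem.Set (Int × Int) × List (Int × Int) × Int × Int × Int) (c : Int × Int) :
    PySem.Set (Int × Int) × List (Int × Int) × Int × Int × Int :=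
  if 0 ≤ c.1 ∧ c.1 < h ∧ 0 ≤ c.2 ∧ c.2 < w
      ∧ PySem.List.pyGetD (PySem.List.pyGetD dm c.1 []) c.2 false = true
      ∧ ¬ c ∈ st.1 then
    (PySem.Set.add st.1 c, st.2.1 ++ [c],
     st.2.2.1 + 1, st.2.2.2.1 + c.1, st.2.2.2.2 + c.2)
  else st

-- `while frontier: cand = …; frontier = []; <scan>` — one round per recursive call
-- (fuel makes the while loop structurally recursive; the port always gets enough, see pvLayers_run)
def pvLayers (dm : List (List Bool)) (h w : Int) :
    Nat → PySem.Set (Int × Int) → List (Int × Int) → Int × Int × Int →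
    PySem.Set (Int × Int) × Int × Int × Int
  | 0, seen, _, stats => (seen, stats)
  | fuel + 1, seen, frontier, stats =>
    if frontier = [] then (seen, stats)
    else
      let st := (pvCand frontier).foldl (pvScan dm h w) (seen, [], stats)
      pvLayers dm h w fuel st.1 st.2.1 st.2.2

-- body of `for x, v in enumerate(row[:w]): …`
def pvVisit (dm : List (List Bool)) (h w mins : Int) (fuel : Nat)
    (st : PySem.Set (Int × Int) × List (Int × Int)) (y x : Int) (v : Bool) :
    PySem.Set (Int × Int) × List (Int × Int) :=
  if v = true ∧ ¬ (y, x) ∈ st.1 then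
    let r := pvLayers dm h w fuel (PySem.Set.add st.1 (y, x)) [(y, x)] (1, y, x)
    if mins ≤ r.2.1 then
      (r.1, st.2 ++ [(PySem.Int.floordiv r.2.2.1 r.2.1, PySem.Int.floordiv r.2.2.2 r.2.1)])
    else (r.1, st.2)
  else st

def extract_clusters_alt (diff_map : List (List Bool)) (min_cluster_size : Int) : List (Int × Int) :=
  let h : Int := (diff_map.length : Int)
  -- diff_map[0]: Python raises IndexError on an empty diff_map — excluded by Pre_
  let w : Int := ((PySem.List.pyGetD diff_map 0 []).length : Int)
  let fuel := h.toNat * w.toNat + 2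
  ((PySem.List.enumerate diff_map 0).foldl (fun st p =>
      (PySem.List.enumerate (PySem.List.slice p.2 none (some w)) 0).foldl
        (fun st q => pvVisit diff_map h w min_cluster_size fuel st p.1 q.1 q.2) st)
    (([] : PySem.Set (Int × Int)), ([] : List (Int × Int)))).2

-- ===== PRECONDITION & SPEC =====
-- Pre_ excludes exactly the inputs on which Python A raises IndexError: an empty diff_map
-- (diff_map[0]) and grids with a row shorter than the first row (diff_map[y][x] for x < w).
def Pre_extract_clusters (diff_map : List (List Bool)) (min_cluster_size : Int) : Prop :=
  diff_map ≠ [] ∧ ∀ r ∈ diff_map, (diff_map.headD []).length ≤ r.length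
instance (diff_map : List (List Bool)) (min_cluster_size : Int) : Decidable (Pre_extract_clusters diff_map min_cluster_size) := by unfold Pre_extract_clusters; infer_instance

def pvWitness_extract_clusters : List (List Bool) × Int := ([[true, false], [false, true]], 1)

def Spec_extract_clusters (diff_map : List (List Bool)) (min_cluster_size : Int) (out : List (Int × Int)) : Prop := out = extract_clusters_alt diff_map min_cluster_size
instance (diff_map : List (List Bool)) (min_cluster_size : Int) (out : List (Int × Int)) : Decidable (Spec_extract_clusters diff_map min_cluster_size out) := by unfold Spec_extract_clusters; infer_instance

-- ===== CLAIM (what is proved, stated in full; the proofs are below) =====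
def Claim_equal_extract_clusters : Prop := ∀ (diff_map : List (List Bool)) (min_cluster_size : Int), Dom_extract_clusters diff_map min_cluster_size → Pre_extract_clusters diff_map min_cluster_size → Spec_extract_clusters diff_map min_cluster_size (extract_clusters diff_map min_cluster_size)

-- ===== LEMMAS AND PROOFS =====

-- abstract view of the grid -------------------------------------------------
def pvInb (h w : Int) (c : Int × Int) : Prop := 0 ≤ c.1 ∧ c.1 < h ∧ 0 ≤ c.2 ∧ c.2 < w
def pvVal (diff_map : List (List Bool)) (c : Int × Int) : Prop :=
  PySem.List.pyGetD (PySem.List.pyGetD diff_map c.1 []) c.2 false = true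
def pvFg (diff_map : List (List Bool)) (h w : Int) (c : Int × Int) : Prop :=
  pvInb h w c ∧ pvVal diff_map c
def pvM (v : List (List Bool)) (c : Int × Int) : Prop :=
  PySem.List.pyGetD (PySem.List.pyGetD v c.1 []) c.2 false = true
def pvAdj (c d : Int × Int) : Prop := (d.1 - c.1).natAbs ≤ 1 ∧ (d.2 - c.2).natAbs ≤ 1
def pvReach (diff_map : List (List Bool)) (h w : Int) (s c : Int × Int) : Prop :=
  Relation.ReflTransGen (fun a b => pvAdj a b ∧ pvFg diff_map h w b) s c
def pvDims (h w : Int) (v : List (List Bool)) : Prop :=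
  v.length = h.toNat ∧ ∀ (i : Nat) (hi : i < v.length), (v[i]).length = w.toNat
def pvMark (v : List (List Bool)) (y x : Int) : List (List Bool) :=
  PySem.List.pySetD v y (PySem.List.pySetD (PySem.List.pyGetD v y []) x true)
theorem pvAdj_symm {c d : Int × Int} (h : pvAdj c d) : pvAdj d c := by
  unfold pvAdj at *; omega

theorem pvReach_fg {dm : List (List Bool)} {h w : Int} {s c : Int × Int}
    (hr : pvReach dm h w s c) (hs : pvFg dm h w s) : pvFg dm h w c := by
  induction hr with
  | refl => exact hs
  | tail _ h2 _ => exact h2.2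

theorem pvReach_not_closed {dm : List (List Bool)} {h w : Int} {P : Int × Int → Prop}
    (hcl : ∀ c d, P c → pvAdj c d → pvFg dm h w d → P d)
    {s c : Int × Int} (hs : ¬ P s) (hfg : pvFg dm h w s)
    (hr : pvReach dm h w s c) : ¬ P c := by
  induction hr with
  | refl => exact hs
  | tail h1 h2 ih =>
    intro hc
    exact ih (hcl _ _ hc (pvAdj_symm h2.1) (pvReach_fg h1 hfg))

-- characterise a flood-fill result from its invariants ----------------------
theorem pvPost_char {dm : List (List Bool)} {h w : Int} {P : Int × Int → Prop}
    {s : Int × Int} {L : List (Int × Int)}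
    (hcl : ∀ c d, P c → pvAdj c d → pvFg dm h w d → P d)
    (hs : ¬ P s) (hfg : pvFg dm h w s)
    (hmemL : ∀ c ∈ L, pvFg dm h w c ∧ pvReach dm h w s c ∧ ¬ P c)
    (hclo : ∀ c ∈ L, ∀ d, pvAdj c d → pvFg dm h w d → (P d ∨ d ∈ L))
    (hsL : s ∈ L) :
    ∀ c, c ∈ L ↔ pvReach dm h w s c := by
  intro c
  constructor
  · exact fun hc => (hmemL c hc).2.1
  · intro hr
    induction hr with
    | refl => exact hsL
    | tail h1 h2 ih =>
      rcases hclo _ ih _ h2.1 h2.2 with hP | hL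
      · exact absurd hP (pvReach_not_closed hcl hs hfg (h1.tail h2))
      · exact hL

-- A's neighbour scan --------------------------------------------------------
theorem pvFoldChar {σ : Type} {dm : List (List Bool)} {h w : Int}
    (good : σ → Prop) (memb : σ → (Int × Int) → Prop)
    (step : σ × List (Int × Int) → (Int × Int) → σ × List (Int × Int))
    (hgood : ∀ st c, good st.1 → good (step st c).1)
    (hmem : ∀ st c, good st.1 → ∀ d,
      (memb (step st c).1 d ↔ memb st.1 d ∨ (d = c ∧ pvFg dm h w c ∧ ¬ memb st.1 c)))
    (hlistp : ∀ st c, good st.1 → pvFg dm h w c → ¬ memb st.1 c → (step st c).2 = st.2 ++ [c])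
    (hlistn : ∀ st c, good st.1 → ¬ (pvFg dm h w c ∧ ¬ memb st.1 c) → (step st c).2 = st.2) :
    ∀ (cs : List (Int × Int)) (st : σ × List (Int × Int)), good st.1 → ∃ new,
      (cs.foldl step st).2 = st.2 ++ new ∧
      good (cs.foldl step st).1 ∧
      (∀ d, memb (cs.foldl step st).1 d ↔ memb st.1 d ∨ d ∈ new) ∧
      new.Nodup ∧
      (∀ c ∈ new, pvFg dm h w c ∧ c ∈ cs ∧ ¬ memb st.1 c) ∧
      (∀ c ∈ cs, pvFg dm h w c → memb (cs.foldl step st).1 c) := by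
  intro cs
  induction cs with
  | nil =>
    intro st hg
    exact ⟨[], by simp, hg, by simp, by simp, by simp, by simp⟩
  | cons c cs ih =>
    intro st hg
    have hg' : good (step st c).1 := hgood st c hg
    obtain ⟨new, e1, e2, e3, e4, e5, e6⟩ := ih (step st c) hg'
    by_cases hc : pvFg dm h w c ∧ ¬ memb st.1 c
    · refine ⟨c :: new, ?_, e2, ?_, ?_, ?_, ?_⟩
      · rw [List.foldl_cons, e1, hlistp st c hg hc.1 hc.2]; simp
      · intro d
        rw [List.foldl_cons, e3 d, hmem st c hg d, List.mem_cons]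
        tauto
      · rw [List.nodup_cons]
        refine ⟨fun hcnew => ?_, e4⟩
        exact (e5 c hcnew).2.2 ((hmem st c hg c).mpr (Or.inr ⟨rfl, hc⟩))
      · intro a ha
        rcases List.mem_cons.mp ha with rfl | ha
        · exact ⟨hc.1, List.mem_cons_self, hc.2⟩
        · have h5 := e5 a ha
          rw [hmem st c hg a] at h5
          refine ⟨h5.1, List.mem_cons_of_mem _ h5.2.1, fun hm => h5.2.2 (Or.inl hm)⟩
      · intro a ha hfga
        rcases List.mem_cons.mp ha with rfl | ha
        · rw [List.foldl_cons, e3 a]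
          exact Or.inl ((hmem st a hg a).mpr (Or.inr ⟨rfl, hc⟩))
        · exact e6 a ha hfga
    · have hmemc : ∀ d, memb (step st c).1 d ↔ memb st.1 d := by
        intro d
        rw [hmem st c hg d]
        constructor
        · rintro (hd | ⟨rfl, h1, h2⟩)
          · exact hd
          · exact absurd ⟨h1, h2⟩ hc
        · exact Or.inl
      refine ⟨new, ?_, e2, ?_, e4, ?_, ?_⟩
      · rw [List.foldl_cons, e1, hlistn st c hg hc]
      · intro d; rw [List.foldl_cons, e3 d, hmemc d]
      · intro a ha
        have h5 := e5 a ha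
        rw [hmemc a] at h5
        exact ⟨h5.1, List.mem_cons_of_mem _ h5.2.1, h5.2.2⟩
      · intro a ha hfga
        rcases List.mem_cons.mp ha with rfl | ha
        · by_cases hm : memb st.1 a
          · rw [List.foldl_cons, e3 a, hmemc a]; exact Or.inl hm
          · exact absurd ⟨hfga, hm⟩ hc
        · exact e6 a ha hfga

-- matrix lemmas --------------------------------------------------------------
theorem pvDims_mark {h w : Int} {v : List (List Bool)} (hd : pvDims h w v)
    {y x : Int} (hy : 0 ≤ y) : pvDims h w (pvMark v y x) := by
  unfold pvMark
  rw [PySem.List.pySetD_of_nonneg _ _ hy]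
  refine ⟨by simp [hd.1], ?_⟩
  intro i hi
  simp only [List.length_set] at hi
  rw [List.getElem_set]
  split
  · next heq =>
    have hlt : y < (v.length : Int) := by omega
    rw [PySem.List.length_pySetD, PySem.List.pyGetD_eq_getElem _ _ hy hlt]
    exact hd.2 _ (by omega)
  · exact hd.2 i hi

theorem pvM_mark {h w : Int} {v : List (List Bool)} (hd : pvDims h w v)
    {y x : Int} (hin : pvInb h w (y, x)) :
    ∀ d, pvInb h w d → (pvM (pvMark v y x) d ↔ d = (y, x) ∨ pvM v d) := by
  obtain ⟨hy0, hyh, hx0, hxw⟩ := hin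
  intro d hdin
  obtain ⟨hd1, hd2, hd3, hd4⟩ := hdin
  have hvl : (v.length : Int) = h := by rw [hd.1]; omega
  have hylt : y < (v.length : Int) := by omega
  have hdlt : d.1 < (v.length : Int) := by omega
  have hrowy : PySem.List.pyGetD v y [] = v[y.toNat] :=
    PySem.List.pyGetD_eq_getElem _ _ hy0 hylt
  have hrowylen : (v[y.toNat]'(by omega)).length = w.toNat := hd.2 _ (by omega)
  unfold pvM pvMark
  rw [PySem.List.pySetD_of_nonneg _ _ hy0]
  have houter : PySem.List.pyGetD (v.set y.toNat (PySem.List.pySetD (PySem.List.pyGetD v y []) x true)) d.1 [] =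
      (v.set y.toNat (PySem.List.pySetD (PySem.List.pyGetD v y []) x true))[d.1.toNat]'(by simp; omega) :=
    PySem.List.pyGetD_eq_getElem _ _ hd1 (by simp; omega)
  rw [houter, List.getElem_set]
  split
  · next heq =>
    have hdy : d.1 = y := by omega
    rw [hrowy, PySem.List.pySetD_of_nonneg _ _ hx0,
        PySem.List.pyGetD_eq_getElem _ _ hd3 (by simp [hrowylen]; omega),
        List.getElem_set]
    have hinner : PySem.List.pyGetD v d.1 [] = v[y.toNat] := by rw [hdy, hrowy]
    rw [hinner]
    split
    · next heq2 =>
      have hdx : d.2 = x := by omega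
      constructor
      · intro _; left; exact Prod.ext hdy hdx
      · intro _; rfl
    · next hne2 =>
      have hdx : d.2 ≠ x := by omega
      rw [PySem.List.pyGetD_eq_getElem _ _ hd3 (by rw [hrowylen]; omega)]
      constructor
      · intro hv; right; exact hv
      · rintro (rfl | hv)
        · exact absurd rfl hdx
        · exact hv
  · next hne =>
    have hdy : d.1 ≠ y := by omega
    have hrowd : PySem.List.pyGetD v d.1 [] = v[d.1.toNat]'(by omega) :=
      PySem.List.pyGetD_eq_getElem _ _ hd1 hdlt
    rw [hrowd]
    constructor
    · exact fun hv => Or.inr hv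
    · rintro (rfl | hv)
      · exact absurd rfl hdy
      · exact hv

theorem pvDims_init {h w : Int} :
    pvDims h w (List.replicate h.toNat (List.replicate w.toNat false)) := by
  refine ⟨by simp, ?_⟩
  intro i hi
  simp

theorem pvM_init {h w : Int} :
    ∀ d, pvInb h w d → ¬ pvM (List.replicate h.toNat (List.replicate w.toNat false)) d := by
  intro d ⟨h1, h2, h3, h4⟩
  unfold pvM
  rw [PySem.List.pyGetD_eq_getElem _ _ h1 (by simp; omega), List.getElem_replicate,
      PySem.List.pyGetD_eq_getElem _ _ h3 (by simp; omega), List.getElem_replicate]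
  simp

-- A's neighbour list --------------------------------------------------------
def pvNbrsA (cy cx : Int) : List (Int × Int) :=
  [(cy + -1, cx + -1), (cy + -1, cx + 0), (cy + -1, cx + 1),
   (cy + 0, cx + -1), (cy + 0, cx + 0), (cy + 0, cx + 1),
   (cy + 1, cx + -1), (cy + 1, cx + 0), (cy + 1, cx + 1)]

theorem pvMem_nbrsA {cy cx : Int} {c : Int × Int} :
    c ∈ pvNbrsA cy cx ↔ pvAdj (cy, cx) c := by
  obtain ⟨a, b⟩ := c
  simp [pvNbrsA, pvAdj, Prod.ext_iff]
  omega

theorem pvAExpand_eq {dm : List (List Bool)} {h w cy cx : Int}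
    {st : List (List Bool) × List (Int × Int)} :
    pvAExpand dm h w cy cx st =
      (pvNbrsA cy cx).foldl (fun st c => pvAStep dm h w st c.1 c.2) st := rfl

theorem pvAExpand_char {dm : List (List Bool)} {h w cy cx : Int}
    {v : List (List Bool)} {stack : List (Int × Int)} (hd : pvDims h w v) :
    ∃ new,
      (pvAExpand dm h w cy cx (v, stack)).2 = stack ++ new ∧
      pvDims h w (pvAExpand dm h w cy cx (v, stack)).1 ∧
      (∀ d, (pvInb h w d ∧ pvM (pvAExpand dm h w cy cx (v, stack)).1 d) ↔
        ((pvInb h w d ∧ pvM v d) ∨ d ∈ new)) ∧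
      new.Nodup ∧
      (∀ c ∈ new, pvFg dm h w c ∧ pvAdj (cy, cx) c ∧ ¬ (pvInb h w c ∧ pvM v c)) ∧
      (∀ c, pvAdj (cy, cx) c → pvFg dm h w c →
        (pvInb h w c ∧ pvM (pvAExpand dm h w cy cx (v, stack)).1 c)) := by
  have main := pvFoldChar (dm := dm) (h := h) (w := w)
    (good := pvDims h w) (memb := fun v d => pvInb h w d ∧ pvM v d)
    (step := fun st c => pvAStep dm h w st c.1 c.2)
    (by -- hgood
      intro st c hg
      show pvDims h w (pvAStep dm h w st c.1 c.2).1
      unfold pvAStep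
      split
      · next hcond => exact pvDims_mark hg hcond.1
      · exact hg)
    (by -- hmem
      intro st c hg d
      show (pvInb h w d ∧ pvM (pvAStep dm h w st c.1 c.2).1 d) ↔
        (pvInb h w d ∧ pvM st.1 d) ∨ (d = c ∧ pvFg dm h w c ∧ ¬ (pvInb h w c ∧ pvM st.1 c))
      unfold pvAStep
      split
      · next hcond =>
        obtain ⟨h1, h2, h3, h4, h5, h6⟩ := hcond
        have hinc : pvInb h w c := ⟨h1, h2, h3, h4⟩
        have hfgc : pvFg dm h w c := ⟨hinc, h5⟩
        have hnm : ¬ (pvInb h w c ∧ pvM st.1 c) := fun hm => h6 hm.2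
        have hmk := pvM_mark (y := c.1) (x := c.2) hg hinc
        simp only [Prod.mk.eta] at hmk
        change pvInb h w d ∧ pvM (pvMark st.1 c.1 c.2) d ↔ _
        by_cases hdin : pvInb h w d
        · rw [show pvM (pvMark st.1 c.1 c.2) d ↔ d = c ∨ pvM st.1 d from hmk d hdin]
          constructor
          · rintro ⟨_, rfl | hv⟩
            · exact Or.inr ⟨rfl, hfgc, hnm⟩
            · exact Or.inl ⟨hdin, hv⟩
          · rintro (⟨_, hv⟩ | ⟨rfl, _, _⟩)
            · exact ⟨hdin, Or.inr hv⟩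
            · exact ⟨hdin, Or.inl rfl⟩
        · constructor
          · rintro ⟨hdin', _⟩; exact absurd hdin' hdin
          · rintro (⟨hdin', _⟩ | ⟨rfl, hfg', _⟩)
            · exact absurd hdin' hdin
            · exact absurd hfg'.1 hdin
      · next hcond =>
        constructor
        · exact Or.inl
        · rintro (hv | ⟨rfl, hfg', hnm'⟩)
          · exact hv
          · exact absurd ⟨hfg'.1.1, hfg'.1.2.1, hfg'.1.2.2.1, hfg'.1.2.2.2, hfg'.2,
              fun hm => hnm' ⟨hfg'.1, hm⟩⟩ hcond)
    (by -- hlistp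
      intro st c hg hfg hnm
      show (pvAStep dm h w st c.1 c.2).2 = st.2 ++ [c]
      unfold pvAStep
      rw [if_pos ⟨hfg.1.1, hfg.1.2.1, hfg.1.2.2.1, hfg.1.2.2.2, hfg.2,
        fun hm => hnm ⟨hfg.1, hm⟩⟩])
    (by -- hlistn
      intro st c hg hcond
      show (pvAStep dm h w st c.1 c.2).2 = st.2
      unfold pvAStep
      rw [if_neg (fun hc => hcond ⟨⟨⟨hc.1, hc.2.1, hc.2.2.1, hc.2.2.2.1⟩, hc.2.2.2.2.1⟩,
        fun hm => hc.2.2.2.2.2 hm.2⟩)])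
    (pvNbrsA cy cx) (v, stack) hd
  obtain ⟨new, e1, e2, e3, e4, e5, e6⟩ := main
  rw [← pvAExpand_eq] at e1 e2 e3 e6
  refine ⟨new, e1, e2, e3, e4, ?_, ?_⟩
  · intro c hc
    obtain ⟨f1, f2, f3⟩ := e5 c hc
    exact ⟨f1, pvMem_nbrsA.mp f2, f3⟩
  · intro c hadj hfg
    exact e6 c (pvMem_nbrsA.mpr hadj) hfg

-- a duplicate-free list of in-grid cells has at most h*w elements ------------
theorem pvLen_le {h w : Int} {L : List (Int × Int)} (hnd : L.Nodup)
    (hin : ∀ c ∈ L, pvInb h w c) : L.length ≤ h.toNat * w.toNat := by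
  have hsub : L.toFinset ⊆ Finset.Icc 0 (h - 1) ×ˢ Finset.Icc 0 (w - 1) := by
    intro c hc
    obtain ⟨h1, h2, h3, h4⟩ := hin c (List.mem_toFinset.mp hc)
    simp only [Finset.mem_product, Finset.mem_Icc]
    omega
  calc L.length = L.toFinset.card := (List.toFinset_card_of_nodup hnd).symm
    _ ≤ _ := Finset.card_le_card hsub
    _ = h.toNat * w.toNat := by
        rw [Finset.card_product, Int.card_Icc, Int.card_Icc]
        congr 1 <;> omega

-- invariant of A's dfs while-loop -------------------------------------------
def pvIA (dm : List (List Bool)) (h w : Int) (P : Int × Int → Prop) (s : Int × Int)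
    (v : List (List Bool)) (stack pixels : List (Int × Int)) : Prop :=
  pvDims h w v ∧
  (∀ d, (pvInb h w d ∧ pvM v d) ↔ (P d ∨ d ∈ pixels ++ stack)) ∧
  (pixels ++ stack).Nodup ∧
  (∀ c ∈ pixels ++ stack, pvFg dm h w c ∧ pvReach dm h w s c ∧ ¬ P c) ∧
  (∀ c ∈ pixels, ∀ d, pvAdj c d → pvFg dm h w d → (P d ∨ d ∈ pixels ++ stack)) ∧
  s ∈ pixels ++ stack

theorem pvADfs_run {dm : List (List Bool)} {h w : Int} {P : Int × Int → Prop} {s : Int × Int} :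
    ∀ (fuel : Nat) (v : List (List Bool)) (stack pixels : List (Int × Int)),
      pvIA dm h w P s v stack pixels →
      h.toNat * w.toNat + 1 ≤ fuel + pixels.length →
      pvIA dm h w P s (pvADfs dm h w fuel v stack pixels).1 []
        (pvADfs dm h w fuel v stack pixels).2 := by
  intro fuel
  induction fuel with
  | zero =>
    intro v stack pixels hIA hfuel
    exfalso
    obtain ⟨_, _, hnd, hmem, _, _⟩ := hIA
    have hle : (pixels ++ stack).length ≤ h.toNat * w.toNat :=
      pvLen_le hnd (fun c hc => (hmem c hc).1.1)
    simp only [List.length_append] at hle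
    omega
  | succ fuel ih =>
    intro v stack pixels hIA hfuel
    obtain ⟨hdims, hiff, hnd, hmem, hclo, hsin⟩ := hIA
    rcases hstack : stack.getLast? with _ | c
    · rw [List.getLast?_eq_none_iff] at hstack
      subst hstack
      have hred : pvADfs dm h w (fuel + 1) v [] pixels = (v, pixels) := rfl
      rw [hred]
      exact ⟨hdims, by simpa using hiff, by simpa using hnd, by simpa using hmem,
        by simpa using hclo, by simpa using hsin⟩
    · obtain ⟨rest, rfl⟩ := List.getLast?_eq_some_iff.mp hstack
      have hred : pvADfs dm h w (fuel + 1) v (rest ++ [c]) pixels =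
          pvADfs dm h w fuel (pvAExpand dm h w c.1 c.2 (v, rest)).1
            (pvAExpand dm h w c.1 c.2 (v, rest)).2 (pixels ++ [c]) := by
        simp only [pvADfs, hstack, List.dropLast_concat]
      rw [hred]
      obtain ⟨new, e1, e2, e3, e4, e5, e6⟩ :=
        pvAExpand_char (dm := dm) (cy := c.1) (cx := c.2) (stack := rest) hdims
      simp only [Prod.mk.eta] at e5 e6
      -- facts about the old state
      have hcold : c ∈ pixels ++ (rest ++ [c]) := by simp
      have hfgc : pvFg dm h w c := (hmem c hcold).1
      have hreachc : pvReach dm h w s c := (hmem c hcold).2.1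
      have hall : ∀ d ∈ pixels ++ (rest ++ [c]), pvInb h w d ∧ pvM v d :=
        fun d hd => (hiff d).mpr (Or.inr hd)
      have hnewdis : ∀ n ∈ new, ∀ d ∈ pixels ++ (rest ++ [c]), n ≠ d := by
        intro n hn d hd heq
        exact (e5 n hn).2.2 (heq ▸ hall d hd)
      have hnewnotP : ∀ n ∈ new, ¬ P n := by
        intro n hn hPn
        exact (e5 n hn).2.2 ((hiff n).mpr (Or.inl hPn))
      -- the new invariant
      have hIA' : pvIA dm h w P s (pvAExpand dm h w c.1 c.2 (v, rest)).1
          (pvAExpand dm h w c.1 c.2 (v, rest)).2 (pixels ++ [c]) := by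
        rw [e1]
        refine ⟨e2, ?_, ?_, ?_, ?_, ?_⟩
        · intro d
          rw [e3 d, hiff d]
          simp only [List.mem_append, List.mem_cons, List.mem_nil_iff]
          tauto
        · have hperm : ((pixels ++ [c]) ++ (rest ++ new)).Perm
              ((pixels ++ (rest ++ [c])) ++ new) := by
            have h1 : (pixels ++ [c]) ++ (rest ++ new) = (pixels ++ ([c] ++ rest)) ++ new := by
              simp [List.append_assoc]
            rw [h1]
            exact ((List.perm_append_comm).append_left pixels).append_right new
          refine hperm.nodup_iff.mpr (List.nodup_append.mpr ⟨hnd, e4, ?_⟩)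
          intro a ha b hb heq
          exact hnewdis b hb a ha heq.symm
        · intro a ha
          simp only [List.mem_append, List.mem_singleton] at ha
          rcases ha with (ha | rfl) | (ha | ha)
          · exact hmem a (by simp [ha])
          · exact ⟨hfgc, hreachc, (hmem a hcold).2.2⟩
          · exact hmem a (by simp [ha])
          · obtain ⟨f1, f2, _⟩ := e5 a ha
            exact ⟨f1, hreachc.tail ⟨f2, f1⟩, hnewnotP a ha⟩
        · intro a ha d hadj hfgd
          simp only [List.mem_append, List.mem_singleton] at ha
          have htrans : (P d ∨ d ∈ pixels ++ (rest ++ [c])) →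
              (P d ∨ d ∈ (pixels ++ [c]) ++ (rest ++ new)) := by
            simp only [List.mem_append, List.mem_singleton]
            tauto
          rcases ha with ha | rfl
          · exact htrans (hclo a ha d hadj hfgd)
          · have := (e3 d).mp (e6 d hadj hfgd)
            rcases this with hv | hv
            · exact htrans ((hiff d).mp hv)
            · right; simp [hv]
        · have : s ∈ pixels ++ (rest ++ [c]) := hsin
          simp only [List.mem_append, List.mem_singleton] at this ⊢
          tauto
      exact ih _ _ _ hIA' (by simp only [List.length_append]; simpa using (by omega : h.toNat * w.toNat + 1 ≤ fuel + (pixels.length + 1)))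

-- B's candidate comprehension -----------------------------------------------
theorem pvMem_cand {frontier : List (Int × Int)} {c : Int × Int} :
    c ∈ pvCand frontier ↔ ∃ p ∈ frontier, pvAdj p c := by
  obtain ⟨a, b⟩ := c
  simp only [pvCand, List.mem_flatMap, List.mem_map]
  constructor
  · rintro ⟨p, hp, dy, hdy, dx, hdx, heq⟩
    refine ⟨p, hp, ?_⟩
    obtain ⟨h1, h2⟩ := Prod.mk.injEq .. ▸ heq
    simp only [List.mem_cons] at hdy hdx
    unfold pvAdj
    rcases hdy with rfl | rfl | rfl | h <;> try (rcases hdx with rfl | rfl | rfl | h' <;> simp_all <;> omega)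
    all_goals simp_all
  · rintro ⟨p, hp, hadj⟩
    obtain ⟨h1, h2⟩ := hadj
    refine ⟨p, hp, a - p.1, ?_, b - p.2, ?_, by simp⟩
    · simp only [List.mem_cons]; omega
    · simp only [List.mem_cons]; omega

-- B's candidate scan, characterised -----------------------------------------
theorem pvScan_char {dm : List (List Bool)} {h w : Int} :
    ∀ (cs : List (Int × Int)) (seen acc : List (Int × Int)) (n sy sx : Int),
      ∃ new,
        cs.foldl (pvScan dm h w) (seen, acc, n, sy, sx) =
          (seen ++ new, acc ++ new,
            n + (new.length : Int), sy + (new.map Prod.fst).sum, sx + (new.map Prod.snd).sum) ∧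
        new.Nodup ∧
        (∀ c ∈ new, pvFg dm h w c ∧ c ∈ cs ∧ c ∉ seen) ∧
        (∀ c ∈ cs, pvFg dm h w c → c ∈ seen ++ new) := by
  intro cs
  induction cs with
  | nil =>
    intro seen acc n sy sx
    exact ⟨[], by simp, by simp, by simp, by simp⟩
  | cons c cs ih =>
    intro seen acc n sy sx
    rw [List.foldl_cons]
    by_cases hC : 0 ≤ c.1 ∧ c.1 < h ∧ 0 ≤ c.2 ∧ c.2 < w
        ∧ PySem.List.pyGetD (PySem.List.pyGetD dm c.1 []) c.2 false = true
        ∧ ¬ c ∈ seen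
    · have hstep : pvScan dm h w (seen, acc, n, sy, sx) c =
          (seen ++ [c], acc ++ [c], n + 1, sy + c.1, sx + c.2) := by
        unfold pvScan
        rw [if_pos hC]
        simp [PySem.Set.add, PySem.Set.contains, hC.2.2.2.2.2]
      rw [hstep]
      obtain ⟨new', e1, e2, e3, e4⟩ := ih (seen ++ [c]) (acc ++ [c]) (n + 1) (sy + c.1) (sx + c.2)
      have hfgc : pvFg dm h w c := ⟨⟨hC.1, hC.2.1, hC.2.2.1, hC.2.2.2.1⟩, hC.2.2.2.2.1⟩
      refine ⟨c :: new', ?_, ?_, ?_, ?_⟩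
      · rw [e1]
        refine Prod.ext (by simp) (Prod.ext (by simp) (Prod.ext ?_ (Prod.ext ?_ ?_))) <;>
          simp <;> ring
      · rw [List.nodup_cons]
        refine ⟨fun hc => (e3 c hc).2.2 (by simp), e2⟩
      · intro a ha
        rcases List.mem_cons.mp ha with rfl | ha
        · exact ⟨hfgc, List.mem_cons_self, hC.2.2.2.2.2⟩
        · exact ⟨(e3 a ha).1, List.mem_cons_of_mem _ (e3 a ha).2.1,
            fun hm => (e3 a ha).2.2 (by simp [hm])⟩
      · intro a ha hfga
        rcases List.mem_cons.mp ha with rfl | ha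
        · simp
        · have := e4 a ha hfga
          simp only [List.mem_append, List.mem_cons] at this ⊢
          tauto
    · have hstep : pvScan dm h w (seen, acc, n, sy, sx) c = (seen, acc, n, sy, sx) := by
        unfold pvScan
        rw [if_neg hC]
      rw [hstep]
      obtain ⟨new, e1, e2, e3, e4⟩ := ih seen acc n sy sx
      refine ⟨new, e1, e2, ?_, ?_⟩
      · intro a ha
        exact ⟨(e3 a ha).1, List.mem_cons_of_mem _ (e3 a ha).2.1, (e3 a ha).2.2⟩
      intro a ha hfga
      rcases List.mem_cons.mp ha with rfl | ha
      · have hmem : a ∈ seen := by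
          by_contra hm
          exact hC ⟨hfga.1.1, hfga.1.2.1, hfga.1.2.2.1, hfga.1.2.2.2, hfga.2, hm⟩
        simp [hmem]
      · exact e4 a ha hfga

theorem pvLayers_nil {dm : List (List Bool)} {h w : Int} {fuel : Nat}
    {seen : PySem.Set (Int × Int)} {stats : Int × Int × Int} :
    pvLayers dm h w fuel seen [] stats = (seen, stats) := by
  cases fuel <;> rfl

-- running B's while-loop from a layer invariant ------------------------------
theorem pvLayers_run {dm : List (List Bool)} {h w : Int}
    {seen0 : List (Int × Int)} {s : Int × Int} :
    ∀ (fuel : Nat) (comp older frontier : List (Int × Int)),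
      comp = older ++ frontier →
      comp.Nodup →
      (∀ c ∈ comp, pvFg dm h w c ∧ pvReach dm h w s c ∧ c ∉ seen0) →
      (∀ c ∈ older, ∀ d, pvAdj c d → pvFg dm h w d → d ∈ seen0 ++ comp) →
      s ∈ comp →
      h.toNat * w.toNat + 2 ≤ fuel + comp.length →
      ∃ compF,
        pvLayers dm h w fuel (seen0 ++ comp) frontier
            ((comp.length : Int), (comp.map Prod.fst).sum, (comp.map Prod.snd).sum) =
          (seen0 ++ compF,
            ((compF.length : Int), (compF.map Prod.fst).sum, (compF.map Prod.snd).sum)) ∧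
        compF.Nodup ∧
        (∀ c ∈ compF, pvFg dm h w c ∧ pvReach dm h w s c ∧ c ∉ seen0) ∧
        (∀ c ∈ compF, ∀ d, pvAdj c d → pvFg dm h w d → d ∈ seen0 ++ compF) ∧
        s ∈ compF := by
  intro fuel
  induction fuel with
  | zero =>
    intro comp older frontier hsplit hnd hmem hclo hs hfuel
    exfalso
    have hle : comp.length ≤ h.toNat * w.toNat :=
      pvLen_le hnd (fun c hc => (hmem c hc).1.1)
    omega
  | succ fuel ih =>
    intro comp older frontier hsplit hnd hmem hclo hs hfuel
    by_cases hf : frontier = []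
    · subst hf
      have hred : pvLayers dm h w (fuel + 1) (seen0 ++ comp) []
          ((comp.length : Int), (comp.map Prod.fst).sum, (comp.map Prod.snd).sum) =
          (seen0 ++ comp, ((comp.length : Int), (comp.map Prod.fst).sum, (comp.map Prod.snd).sum)) :=
        pvLayers_nil
      refine ⟨comp, hred, hnd, hmem, ?_, hs⟩
      intro c hc d hadj hfgd
      have hco : c ∈ older := by rw [hsplit] at hc; simpa using hc
      exact hclo c hco d hadj hfgd
    · have hred : pvLayers dm h w (fuel + 1) (seen0 ++ comp) frontier
          ((comp.length : Int), (comp.map Prod.fst).sum, (comp.map Prod.snd).sum) =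
          pvLayers dm h w fuel
            ((pvCand frontier).foldl (pvScan dm h w)
              (seen0 ++ comp, [], (comp.length : Int), (comp.map Prod.fst).sum, (comp.map Prod.snd).sum)).1
            ((pvCand frontier).foldl (pvScan dm h w)
              (seen0 ++ comp, [], (comp.length : Int), (comp.map Prod.fst).sum, (comp.map Prod.snd).sum)).2.1
            ((pvCand frontier).foldl (pvScan dm h w)
              (seen0 ++ comp, [], (comp.length : Int), (comp.map Prod.fst).sum, (comp.map Prod.snd).sum)).2.2 := by
        simp only [pvLayers, if_neg hf]
      obtain ⟨new, e1, e2, e3, e4⟩ :=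
        pvScan_char (dm := dm) (h := h) (w := w) (pvCand frontier) (seen0 ++ comp) []
          ((comp.length : Int)) ((comp.map Prod.fst).sum) ((comp.map Prod.snd).sum)
      rw [hred, e1]
      simp only [List.nil_append]
      -- facts about new
      have hnew_nmem : ∀ c ∈ new, c ∉ seen0 ++ comp := fun c hc => (e3 c hc).2.2
      have hnew_fg : ∀ c ∈ new, pvFg dm h w c := fun c hc => (e3 c hc).1
      have hnew_reach : ∀ c ∈ new, pvReach dm h w s c := by
        intro c hc
        obtain ⟨p, hp, hadj⟩ := pvMem_cand.mp (e3 c hc).2.1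
        have hpc : p ∈ comp := by rw [hsplit]; exact List.mem_append.mpr (Or.inr hp)
        exact (hmem p hpc).2.1.tail ⟨hadj, hnew_fg c hc⟩
      -- the combined component
      have hcomp'_eq : (seen0 ++ comp) ++ new = seen0 ++ (comp ++ new) := by
        rw [List.append_assoc]
      have hstats : ((comp.length : Int) + (new.length : Int),
          (comp.map Prod.fst).sum + (new.map Prod.fst).sum,
          (comp.map Prod.snd).sum + (new.map Prod.snd).sum) =
          (((comp ++ new).length : Int), ((comp ++ new).map Prod.fst).sum,
            ((comp ++ new).map Prod.snd).sum) := by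
        refine Prod.ext ?_ (Prod.ext ?_ ?_) <;>
          simp [List.length_append, List.map_append, List.sum_append]
      have hnd' : (comp ++ new).Nodup := by
        refine List.nodup_append.mpr ⟨hnd, e2, ?_⟩
        intro a ha b hb heq
        exact hnew_nmem b hb (by simp [heq ▸ ha])
      have hmem' : ∀ c ∈ comp ++ new, pvFg dm h w c ∧ pvReach dm h w s c ∧ c ∉ seen0 := by
        intro c hc
        rcases List.mem_append.mp hc with hc | hc
        · exact hmem c hc
        · exact ⟨hnew_fg c hc, hnew_reach c hc,
            fun h0 => hnew_nmem c hc (by simp [h0])⟩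
      have hclo' : ∀ c ∈ comp, ∀ d, pvAdj c d → pvFg dm h w d →
          d ∈ seen0 ++ (comp ++ new) := by
        intro c hc d hadj hfgd
        rcases List.mem_append.mp (hsplit ▸ hc) with hco | hcf
        · have := hclo c hco d hadj hfgd
          simp only [List.mem_append] at this ⊢
          tauto
        · have hdc : d ∈ pvCand frontier := pvMem_cand.mpr ⟨c, hcf, hadj⟩
          have := e4 d hdc hfgd
          simp only [List.mem_append] at this ⊢
          tauto
      have hs' : s ∈ comp ++ new := List.mem_append.mpr (Or.inl hs)
      rw [hcomp'_eq, hstats]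
      rcases List.eq_nil_or_concat' new with rfl | ⟨l, a, hna⟩
      · -- the scan added nothing: the next round sees an empty frontier and stops
        have hred2 : pvLayers dm h w fuel (seen0 ++ (comp ++ [])) []
            (((comp ++ []).length : Int), ((comp ++ []).map Prod.fst).sum,
              ((comp ++ []).map Prod.snd).sum) =
            (seen0 ++ (comp ++ []),
              (((comp ++ []).length : Int), ((comp ++ []).map Prod.fst).sum,
                ((comp ++ []).map Prod.snd).sum)) := pvLayers_nil
        rw [hred2]
        refine ⟨comp ++ [], rfl, by simpa using hnd, by simpa using hmem, ?_, by simpa using hs⟩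
        intro c hc d hadj hfgd
        exact hclo' c (by simpa using hc) d hadj hfgd
      · -- the scan added at least one cell: recurse with a strictly larger component
        have hlen1 : 1 ≤ new.length := by rw [hna]; simp
        exact ih (comp ++ new) comp new rfl hnd' hmem' hclo' hs'
          (by simp only [List.length_append]; omega)

-- coupling the two outer loops ----------------------------------------------
def pvRouter (dm : List (List Bool)) (h w : Int)
    (stA : List (List Bool) × List (Int × Int))
    (stB : PySem.Set (Int × Int) × List (Int × Int)) : Prop :=
  pvDims h w stA.1 ∧
  (∀ c, (pvInb h w c ∧ pvM stA.1 c) ↔ c ∈ stB.1) ∧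
  (∀ c ∈ stB.1, pvFg dm h w c) ∧
  (∀ c d, c ∈ stB.1 → pvAdj c d → pvFg dm h w d → d ∈ stB.1) ∧
  stA.2 = stB.2

theorem pvVisit_eq {dm : List (List Bool)} {h w mins : Int} {fuelA fuelB : Nat}
    (hfA : fuelA = h.toNat * w.toNat + 1) (hfB : fuelB = h.toNat * w.toNat + 2)
    {stA : List (List Bool) × List (Int × Int)}
    {stB : PySem.Set (Int × Int) × List (Int × Int)}
    (hR : pvRouter dm h w stA stB) {y x : Int} {v : Bool}
    (hv : v = PySem.List.pyGetD (PySem.List.pyGetD dm y []) x false)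
    (hy0 : 0 ≤ y) (hyh : y < h) (hx0 : 0 ≤ x) (hxw : x < w) :
    pvRouter dm h w (pvACell dm h w mins fuelA stA y x)
      (pvVisit dm h w mins fuelB stB y x v) := by
  obtain ⟨hdims, hiff, hfg, hcl, hclus⟩ := hR
  have hin : pvInb h w (y, x) := ⟨hy0, hyh, hx0, hxw⟩
  unfold pvACell pvVisit
  by_cases hcond : pvVal dm (y, x) ∧ ¬ (y, x) ∈ stB.1
  · have hnotM : ¬ pvM stA.1 (y, x) := fun hm => hcond.2 ((hiff (y, x)).mp ⟨hin, hm⟩)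
    have hfgs : pvFg dm h w (y, x) := ⟨hin, hcond.1⟩
    rw [if_pos (show PySem.List.pyGetD (PySem.List.pyGetD dm y []) x false = true ∧
        ¬ PySem.List.pyGetD (PySem.List.pyGetD stA.1 y []) x false = true from
        ⟨hcond.1, hnotM⟩),
      if_pos (show v = true ∧ ¬ (y, x) ∈ stB.1 from ⟨by rw [hv]; exact hcond.1, hcond.2⟩)]
    have hmeq : PySem.List.pySetD stA.1 y
        (PySem.List.pySetD (PySem.List.pyGetD stA.1 y []) x true) = pvMark stA.1 y x := rfl
    simp only []
    rw [hmeq]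
    -- run A's dfs
    have hIA0 : pvIA dm h w (· ∈ stB.1) (y, x) (pvMark stA.1 y x) [(y, x)] [] := by
      refine ⟨pvDims_mark hdims hy0, ?_, by simp, ?_, by simp, by simp⟩
      · intro d
        by_cases hdin : pvInb h w d
        · rw [show (pvInb h w d ∧ pvM (pvMark stA.1 y x) d) ↔ pvInb h w d ∧ (d = (y, x) ∨ pvM stA.1 d) from
            and_congr_right (fun _ => pvM_mark hdims hin d hdin)]
          constructor
          · rintro ⟨_, rfl | hv'⟩
            · simp
            · exact Or.inl ((hiff d).mp ⟨hdin, hv'⟩)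
          · rintro (hv' | hv')
            · exact ⟨hdin, Or.inr (((hiff d).mpr hv').2)⟩
            · simp only [List.nil_append, List.mem_singleton] at hv'
              exact ⟨hdin, Or.inl hv'⟩
        · constructor
          · rintro ⟨hdin', _⟩; exact absurd hdin' hdin
          · rintro (hv' | hv')
            · exact absurd (hfg d hv').1 hdin
            · simp only [List.nil_append, List.mem_singleton] at hv'
              exact absurd (hv' ▸ hin) hdin
      · intro c hc
        simp only [List.nil_append, List.mem_singleton] at hc
        subst hc
        exact ⟨hfgs, Relation.ReflTransGen.refl, hcond.2⟩
    have hA := pvADfs_run fuelA (pvMark stA.1 y x) [(y, x)] [] hIA0 (by simp [hfA])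
    set pA := pvADfs dm h w fuelA (pvMark stA.1 y x) [(y, x)] [] with hpA
    obtain ⟨hAdims, hAiff, hAnd, hAmem, hAclo, hAs⟩ := hA
    simp only [List.append_nil] at hAiff hAnd hAmem hAclo hAs
    -- run B's layered fill
    have hadd : PySem.Set.add stB.1 (y, x) = stB.1 ++ [(y, x)] := by
      simp [PySem.Set.add, PySem.Set.contains, hcond.2]
    have hstats0 : ((1 : Int), y, x) =
        ((([(y, x)] : List (Int × Int)).length : Int),
          (([(y, x)] : List (Int × Int)).map Prod.fst).sum,
          (([(y, x)] : List (Int × Int)).map Prod.snd).sum) := by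
      simp
    obtain ⟨compF, eB, hBnd, hBmem, hBclo, hBs⟩ :=
      pvLayers_run (dm := dm) (h := h) (w := w) (seen0 := stB.1) (s := (y, x))
        fuelB [(y, x)] [] [(y, x)] (by simp) (by simp)
        (by
          intro c hc
          simp only [List.mem_singleton] at hc
          subst hc
          exact ⟨hfgs, Relation.ReflTransGen.refl, hcond.2⟩)
        (by simp) (by simp) (by simp [hfB])
    rw [hadd, hstats0, eB]
    -- both cell lists are exactly the reachable set
    have charA : ∀ c, c ∈ pA.2 ↔ pvReach dm h w (y, x) c :=
      pvPost_char (fun c d hc => hcl c d hc) hcond.2 hfgs hAmem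
        (fun c hc d hadj hfgd => hAclo c hc d hadj hfgd) hAs
    have charB : ∀ c, c ∈ compF ↔ pvReach dm h w (y, x) c := by
      refine pvPost_char (fun c d hc => hcl c d hc) hcond.2 hfgs hBmem ?_ hBs
      intro c hc d hadj hfgd
      exact List.mem_append.mp (hBclo c hc d hadj hfgd)
    have hperm : pA.2.Perm compF := by
      refine List.perm_of_nodup_nodup_toFinset_eq hAnd hBnd (Finset.ext fun c => ?_)
      simp only [List.mem_toFinset, charA, charB]
    have hlen : pA.2.length = compF.length := hperm.length_eq
    have hsum1 : (pA.2.map Prod.fst).sum = (compF.map Prod.fst).sum :=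
      (hperm.map Prod.fst).sum_eq
    have hsum2 : (pA.2.map Prod.snd).sum = (compF.map Prod.snd).sum :=
      (hperm.map Prod.snd).sum_eq
    -- the four state-components of the new Router
    have c1 : pvDims h w pA.1 := hAdims
    have c2 : ∀ c, (pvInb h w c ∧ pvM pA.1 c) ↔ c ∈ stB.1 ++ compF := by
      intro c
      rw [hAiff c, List.mem_append, charB c, ← charA c]
    have c3 : ∀ c ∈ stB.1 ++ compF, pvFg dm h w c := by
      intro c hc
      rcases List.mem_append.mp hc with hc | hc
      · exact hfg c hc
      · exact (hBmem c hc).1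
    have c4 : ∀ c d, c ∈ stB.1 ++ compF → pvAdj c d → pvFg dm h w d →
        d ∈ stB.1 ++ compF := by
      intro c d hc hadj hfgd
      rcases List.mem_append.mp hc with hc | hc
      · exact List.mem_append.mpr (Or.inl (hcl c d hc hadj hfgd))
      · exact hBclo c hc d hadj hfgd
    rw [show ((pA.2.length : Int)) = ((compF.length : Int)) from by rw [hlen],
        hsum1, hsum2, hclus]
    by_cases hmin : mins ≤ (compF.length : Int)
    · rw [if_pos hmin, if_pos hmin]
      exact ⟨c1, c2, c3, c4, rfl⟩
    · rw [if_neg hmin, if_neg hmin]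
      exact ⟨c1, c2, c3, c4, rfl⟩
  · have hnB : ¬ (v = true ∧ ¬ (y, x) ∈ stB.1) := by
      intro ⟨hval, hnm⟩
      exact hcond ⟨hv.symm.trans hval, hnm⟩
    have hnA : ¬ (PySem.List.pyGetD (PySem.List.pyGetD dm y []) x false = true ∧
        ¬ PySem.List.pyGetD (PySem.List.pyGetD stA.1 y []) x false = true) := by
      intro ⟨hval, hnm⟩
      exact hcond ⟨hval, fun hmem => hnm (((hiff (y, x)).mpr hmem).2)⟩
    rw [if_neg hnA, if_neg hnB]
    exact ⟨hdims, hiff, hfg, hcl, hclus⟩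

theorem pvRowAux {dm : List (List Bool)} {h w mins : Int} {fuelA fuelB : Nat}
    (hfA : fuelA = h.toNat * w.toNat + 1) (hfB : fuelB = h.toNat * w.toNat + 2)
    {y : Int} (hy0 : 0 ≤ y) (hyh : y < h)
    (hwlen : w.toNat ≤ (PySem.List.pyGetD dm y []).length) :
    ∀ (xs : List Int), (∀ x ∈ xs, 0 ≤ x ∧ x < w) →
    ∀ {stA stB}, pvRouter dm h w stA stB →
      pvRouter dm h w (xs.foldl (fun st x => pvACell dm h w mins fuelA st y x) stA)
        (xs.foldl (fun st x => pvVisit dm h w mins fuelB st y x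
          (PySem.List.pyGetD ((PySem.List.pyGetD dm y []).take w.toNat) x false)) stB) := by
  intro xs
  induction xs with
  | nil => intro _ stA stB hR; exact hR
  | cons x xs ih =>
    intro hbd stA stB hR
    rw [List.foldl_cons, List.foldl_cons]
    have hx0 : 0 ≤ x := (hbd x List.mem_cons_self).1
    have hxw : x < w := (hbd x List.mem_cons_self).2
    have hvx : PySem.List.pyGetD ((PySem.List.pyGetD dm y []).take w.toNat) x false =
        PySem.List.pyGetD (PySem.List.pyGetD dm y []) x false := by
      rw [PySem.List.pyGetD_eq_getElem _ _ hx0 (by simp; omega),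
          PySem.List.pyGetD_eq_getElem _ _ hx0 (by omega),
          List.getElem_take]
    exact ih (fun a ha => hbd a (List.mem_cons_of_mem _ ha))
      (pvVisit_eq hfA hfB hR hvx hy0 hyh hx0 hxw)

theorem pvGridAux {dm : List (List Bool)} {h w mins : Int} {fuelA fuelB : Nat}
    (hfA : fuelA = h.toNat * w.toNat + 1) (hfB : fuelB = h.toNat * w.toNat + 2)
    (hw0 : 0 ≤ w)
    (hrows : ∀ y : Int, 0 ≤ y → y < h → w.toNat ≤ (PySem.List.pyGetD dm y []).length) :
    ∀ (ys : List Int), (∀ y ∈ ys, 0 ≤ y ∧ y < h) →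
    ∀ {stA stB}, pvRouter dm h w stA stB →
      pvRouter dm h w
        (ys.foldl (fun st y => (PySem.List.pyRange 0 w 1).foldl
          (fun st x => pvACell dm h w mins fuelA st y x) st) stA)
        (ys.foldl (fun st y =>
          (PySem.List.enumerate (PySem.List.slice (PySem.List.pyGetD dm y []) none (some w)) 0).foldl
            (fun st q => pvVisit dm h w mins fuelB st y q.1 q.2) st) stB) := by
  intro ys
  induction ys with
  | nil => intro _ stA stB hR; exact hR
  | cons y ys ih =>
    intro hbd stA stB hR
    rw [List.foldl_cons, List.foldl_cons]
    have hy0 : 0 ≤ y := (hbd y List.mem_cons_self).1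
    have hyh : y < h := (hbd y List.mem_cons_self).2
    have hwlen := hrows y hy0 hyh
    -- rewrite B's inner fold: row[:w] enumerated is the index range paired with lookups
    have hslice : PySem.List.slice (PySem.List.pyGetD dm y []) none (some w) =
        (PySem.List.pyGetD dm y []).take w.toNat := PySem.List.slice_to _ hw0
    have hlen : ((PySem.List.pyGetD dm y []).take w.toNat).length = w.toNat := by
      simp [hwlen]
    have henum : PySem.List.enumerate ((PySem.List.pyGetD dm y []).take w.toNat) 0 =
        (PySem.List.pyRange 0 w 1).map
          (fun j => (j, PySem.List.pyGetD ((PySem.List.pyGetD dm y []).take w.toNat) j false)) := by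
      have := PySem.List.enumerate_eq_map_pyRange
        ((PySem.List.pyGetD dm y []).take w.toNat) false
      rw [this]
      congr 1
      simp [PySem.List.len, hlen, Int.toNat_of_nonneg hw0]
    refine ih (fun a ha => hbd a (List.mem_cons_of_mem _ ha)) ?_
    rw [hslice, henum, List.foldl_map]
    exact pvRowAux hfA hfB hy0 hyh hwlen (PySem.List.pyRange 0 w 1)
      (fun x hx => PySem.List.mem_pyRange_one.mp hx) hR

-- ===== VERDICT (by name: the statement is the Claim_ definition above) =====
theorem extract_clusters_spec : Claim_equal_extract_clusters := by
  intro dm mins _ hpre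
  obtain ⟨hne, hrows0⟩ := hpre
  unfold Spec_extract_clusters
  show extract_clusters dm mins = extract_clusters_alt dm mins
  simp only [extract_clusters, extract_clusters_alt]
  set h : Int := (dm.length : Int) with hh
  set w : Int := ((PySem.List.pyGetD dm 0 []).length : Int) with hw
  have hw0 : 0 ≤ w := by positivity
  have hfA : (h * w).toNat + 1 = h.toNat * w.toNat + 1 := by
    rw [hh, hw, ← Nat.cast_mul, Int.toNat_natCast]
    simp
  have hhead : PySem.List.pyGetD dm 0 [] = dm.headD [] := by
    rcases dm with _ | ⟨r, rs⟩
    · exact absurd rfl hne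
    · rw [PySem.List.pyGetD_eq_getElem _ _ (le_refl 0) (by simp)]
      simp
  have hrows : ∀ y : Int, 0 ≤ y → y < h → w.toNat ≤ (PySem.List.pyGetD dm y []).length := by
    intro y hy0 hyh
    have hlt : y < (dm.length : Int) := hyh
    have hmem : PySem.List.pyGetD dm y [] ∈ dm := by
      rw [PySem.List.pyGetD_eq_getElem _ _ hy0 hlt]
      exact List.getElem_mem _
    have hle := hrows0 _ hmem
    have hwt : w.toNat = (PySem.List.pyGetD dm 0 []).length := by
      rw [hw]; exact Int.toNat_natCast _
    rw [hwt, hhead]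
    exact hle
  -- the rewritten B outer fold: enumerate dm paired with row lookups
  have henum : PySem.List.enumerate dm 0 =
      (PySem.List.pyRange 0 h 1).map (fun j => (j, PySem.List.pyGetD dm j [])) := by
    rw [PySem.List.enumerate_eq_map_pyRange dm ([] : List Bool)]
    rfl
  have hR0 : pvRouter dm h w
      (List.replicate h.toNat (List.replicate w.toNat false), ([] : List (Int × Int)))
      (([] : PySem.Set (Int × Int)), ([] : List (Int × Int))) := by
    refine ⟨pvDims_init, ?_, by simp, by simp, rfl⟩
    intro c
    constructor
    · rintro ⟨hin, hm⟩; exact absurd hm (pvM_init c hin)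
    · intro hc; exact absurd hc (List.not_mem_nil)
  have main := pvGridAux (dm := dm) (mins := mins) (fuelA := (h * w).toNat + 1)
    (fuelB := h.toNat * w.toNat + 2) hfA rfl hw0 hrows
    (PySem.List.pyRange 0 h 1) (fun y hy => PySem.List.mem_pyRange_one.mp hy) hR0
  rw [henum, List.foldl_map]
  exact main.2.2.2.2
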